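-- pv_equiv track=rewrite | github.com/vovanphuc/hum2song | convert_data.py | create_meta_dict
-- ===== SOURCE A (Python) =====
-- def create_meta_dict(train_meta):
--     sound2id = {}
--     id2hum = {}
--     id2song = {}
--     id2stt = {}
--
--     stt = 0
--     for row in train_meta:
--         music_id = row[0]
--         song_name = row[1].split("/")[-1].split(".")[0]
--         hum_name = row[2].split("/")[-1].split(".")[0]
--         sound2id[song_name] = music_id
--         sound2id[hum_name] = music_id
--
--         if music_id not in id2hum.keys():
--             id2hum[music_id] = [hum_name]
--             id2song[music_id] = [song_name]
--         else:
--             id2hum[music_id].append(hum_name)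
--             id2song[music_id].append(song_name)
--
--         if music_id not in id2stt.keys():
--             id2stt[music_id] = stt
--             stt += 1
--     return sound2id, id2hum, id2song, id2stt
-- ===== SOURCE B (Python) =====
-- def create_meta_dict(train_meta):
--     def stem(path):
--         return path.split("/")[-1].split(".")[0]
--     parsed = [(row[0], stem(row[1]), stem(row[2])) for row in train_meta]
--     sound2id = dict(pair for mid, song, hum in parsed
--                     for pair in ((song, mid), (hum, mid)))
--     ids = list(dict.fromkeys(mid for mid, _, _ in parsed))
--     id2hum = {mid: [h for m, _, h in parsed if m == mid] for mid in ids}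
--     id2song = {mid: [s for m, s, _ in parsed if m == mid] for mid in ids}
--     id2stt = {mid: i for i, mid in enumerate(ids)}
--     return sound2id, id2hum, id2song, id2stt
-- ===== Notes on version B (the rewrite author's own statement) =====
-- stated objective: alternative
-- what changed: A's single loop that branches on membership while maintaining four dicts and an inline counter is replaced by staged passes: parse all rows to (id, song, hum) triples once, build sound2id as dict() over the flattened name/id pairs, dedup the ids via dict.fromkeys, build id2hum/id2song as per-id filter comprehensions over the parsed triples, and derive id2stt by enumerate over the deduped ids.
import Mathlib
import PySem

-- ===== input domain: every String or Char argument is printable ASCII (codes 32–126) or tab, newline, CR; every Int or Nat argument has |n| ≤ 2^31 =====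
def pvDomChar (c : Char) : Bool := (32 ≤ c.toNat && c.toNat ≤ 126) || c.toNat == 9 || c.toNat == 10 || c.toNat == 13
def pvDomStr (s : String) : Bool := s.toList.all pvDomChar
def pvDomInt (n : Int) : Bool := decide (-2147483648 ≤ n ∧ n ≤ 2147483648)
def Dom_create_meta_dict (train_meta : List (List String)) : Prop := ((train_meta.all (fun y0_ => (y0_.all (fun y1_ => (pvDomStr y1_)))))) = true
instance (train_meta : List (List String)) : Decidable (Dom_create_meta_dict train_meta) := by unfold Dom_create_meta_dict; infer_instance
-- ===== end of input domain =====

-- B replaces A's single branching loop by staged passes: parse rows to triples once,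
-- build sound2id as dict() over flattened pairs, dedup the ids (dict.fromkeys), then build
-- id2hum/id2song by per-id filter comprehensions and id2stt by enumerate (objective: alternative).


-- ===== PORT A =====
-- s.split("/")[-1].split(".")[0]; split lists are nonempty so the getD "" defaults are unreachable
def pvName (s : String) : String :=
  (PySem.List.pyGet? ((PySem.Str.split? ((PySem.List.pyGet? ((PySem.Str.split? s "/").getD []) (-1)).getD "") ".").getD []) 0).getD ""

def pvAState : Type :=
  PySem.Dict String String × PySem.Dict String (List String) × PySem.Dict String (List String) ×
    PySem.Dict String Int × Int

-- one iteration of A's loop body (state: sound2id, id2hum, id2song, id2stt, stt)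
def pvAStep (st : pvAState) (row : List String) : pvAState :=
  let (sound2id, id2hum, id2song, id2stt, stt) := st
  let music_id := (PySem.List.pyGet? row 0).getD ""
  let song_name := pvName ((PySem.List.pyGet? row 1).getD "")
  let hum_name := pvName ((PySem.List.pyGet? row 2).getD "")
  let sound2id := (sound2id.insert song_name music_id).insert hum_name music_id
  let (id2hum, id2song) :=
    if id2hum.contains music_id = false then
      (id2hum.insert music_id [hum_name], id2song.insert music_id [song_name])
    else
      (id2hum.modify music_id [] (· ++ [hum_name]), id2song.modify music_id [] (· ++ [song_name]))
  let (id2stt, stt) :=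
    if id2stt.contains music_id = false then (id2stt.insert music_id stt, stt + 1)
    else (id2stt, stt)
  (sound2id, id2hum, id2song, id2stt, stt)

def create_meta_dict (train_meta : List (List String)) : (List (String × String)) × (List (String × List String)) × (List (String × List String)) × (List (String × Int)) :=
  let st := train_meta.foldl pvAStep (PySem.Dict.empty, PySem.Dict.empty, PySem.Dict.empty, PySem.Dict.empty, 0)
  (st.1.items, st.2.1.items, st.2.2.1.items, st.2.2.2.1.items)

-- ===== PORT B =====
-- (row[0], stem(row[1]), stem(row[2])) — pvName is the shared stem helper
def pvTriple (row : List String) : String × String × String :=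
  ((PySem.List.pyGet? row 0).getD "", pvName ((PySem.List.pyGet? row 1).getD ""),
    pvName ((PySem.List.pyGet? row 2).getD ""))

def create_meta_dict_alt (train_meta : List (List String)) : (List (String × String)) × (List (String × List String)) × (List (String × List String)) × (List (String × Int)) :=
  let parsed := train_meta.map pvTriple
  -- dict(pair for mid, song, hum in parsed for pair in ((song, mid), (hum, mid)))
  let sound2id : PySem.Dict String String :=
    (parsed.flatMap (fun t => [(t.2.1, t.1), (t.2.2, t.1)])).foldl
      (fun d q => d.insert q.1 q.2) PySem.Dict.empty
  -- list(dict.fromkeys(mid for mid, _, _ in parsed))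
  let ids := PySem.List.dedup (parsed.map (·.1))
  -- {mid: [h for m, _, h in parsed if m == mid] for mid in ids}
  let id2hum : PySem.Dict String (List String) :=
    ids.foldl (fun d m => d.insert m ((parsed.filter (fun t => t.1 == m)).map (·.2.2))) PySem.Dict.empty
  let id2song : PySem.Dict String (List String) :=
    ids.foldl (fun d m => d.insert m ((parsed.filter (fun t => t.1 == m)).map (·.2.1))) PySem.Dict.empty
  -- {mid: i for i, mid in enumerate(ids)}
  let id2stt : PySem.Dict String Int :=
    (PySem.List.enumerate ids 0).foldl (fun d q => d.insert q.2 q.1) PySem.Dict.empty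
  (sound2id.items, id2hum.items, id2song.items, id2stt.items)

-- ===== PRECONDITION & SPEC =====
-- Pre_ excludes rows with fewer than 3 entries, on which Python A raises IndexError.
def Pre_create_meta_dict (train_meta : List (List String)) : Prop :=
  ∀ row ∈ train_meta, 3 ≤ row.length
instance (train_meta : List (List String)) : Decidable (Pre_create_meta_dict train_meta) := by unfold Pre_create_meta_dict; infer_instance
def pvWitness_create_meta_dict : List (List String) := [["1", "a/b.wav", "c/d.wav"], ["1", "e.wav", "f.wav"]]

def Spec_create_meta_dict (train_meta : List (List String)) (out : (List (String × String)) × (List (String × List String)) × (List (String × List String)) × (List (String × Int))) : Prop := out = create_meta_dict_alt train_meta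
instance (train_meta : List (List String)) (out : (List (String × String)) × (List (String × List String)) × (List (String × List String)) × (List (String × Int))) : Decidable (Spec_create_meta_dict train_meta out) := by unfold Spec_create_meta_dict; infer_instance

-- ===== CLAIM (what is proved, stated in full; the proofs are below) =====
def Claim_equal_create_meta_dict : Prop := ∀ (train_meta : List (List String)), Dom_create_meta_dict train_meta → Pre_create_meta_dict train_meta → Spec_create_meta_dict train_meta (create_meta_dict train_meta)

-- ===== LEMMAS AND PROOFS =====

-- A's loop body expressed on the parsed triple (so A's fold can be compared with B's passes)
def pvAStep' (st : pvAState) (t : String × String × String) : pvAState :=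
  let (sound2id, id2hum, id2song, id2stt, stt) := st
  let (music_id, song_name, hum_name) := t
  let sound2id := (sound2id.insert song_name music_id).insert hum_name music_id
  let (id2hum, id2song) :=
    if id2hum.contains music_id = false then
      (id2hum.insert music_id [hum_name], id2song.insert music_id [song_name])
    else
      (id2hum.modify music_id [] (· ++ [hum_name]), id2song.modify music_id [] (· ++ [song_name]))
  let (id2stt, stt) :=
    if id2stt.contains music_id = false then (id2stt.insert music_id stt, stt + 1)
    else (id2stt, stt)
  (sound2id, id2hum, id2song, id2stt, stt)

theorem pvAStep_eq (st : pvAState) (row : List String) :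
    pvAStep st row = pvAStep' st (pvTriple row) := by
  obtain ⟨a, b, c, d, e⟩ := st; rfl

-- d.modify is insert of the updated default (rfl)
theorem pvModify_eq {ν : Type} (d : PySem.Dict String ν) (k : String) (d0 : ν) (f : ν → ν) :
    d.modify k d0 f = d.insert k (f (d.getD k d0)) := rfl

-- first-seen id list and B's grouped list for key k
def pvIds (p : List (String × String × String)) : List String :=
  PySem.List.dedup (p.map (·.1))

def pvGroup (p : List (String × String × String)) (sel : String × String × String → String)
    (k : String) : List String :=
  (p.filter (fun t => t.1 == k)).map sel

-- the four dictionaries of A's state after processing p, in closed form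
def pvGroupD (p : List (String × String × String)) (sel : String × String × String → String) :
    PySem.Dict String (List String) :=
  PySem.Dict.mk ((pvIds p).map (fun k => (k, pvGroup p sel k)))

def pvSttD (p : List (String × String × String)) : PySem.Dict String Int :=
  PySem.Dict.mk ((PySem.List.enumerate (pvIds p) 0).map (fun q => (q.2, q.1)))

def pvAClosed (p : List (String × String × String)) : pvAState :=
  ((p.flatMap (fun t => [(t.2.1, t.1), (t.2.2, t.1)])).foldl
      (fun d q => d.insert q.1 q.2) PySem.Dict.empty,
   pvGroupD p (·.2.2), pvGroupD p (·.2.1), pvSttD p, ((pvIds p).length : Int))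

theorem pvMem_ids (p : List (String × String × String)) (m : String) :
    m ∈ pvIds p ↔ m ∈ p.map (·.1) := PySem.Set.mem_ofList _ _

theorem pvNodup_ids (p : List (String × String × String)) : (pvIds p).Nodup :=
  PySem.Set.nodup_ofList _

theorem pvSet_contains_eq (s : List String) (x : String) :
    PySem.Set.contains s x = decide (x ∈ s) := by
  simp [PySem.Set.contains]

theorem pvIds_append (p : List (String × String × String)) (t : String × String × String) :
    pvIds (p ++ [t]) = if t.1 ∈ pvIds p then pvIds p else pvIds p ++ [t.1] := by
  have hadd : pvIds (p ++ [t]) = PySem.Set.add (pvIds p) t.1 := by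
    show PySem.Set.ofList ((p ++ [t]).map (·.1)) = _
    rw [List.map_append, PySem.Set.ofList_eq_foldl, List.foldl_append,
      ← PySem.Set.ofList_eq_foldl]
    rfl
  rw [hadd, PySem.Set.add, pvSet_contains_eq]
  by_cases h : t.1 ∈ pvIds p <;> simp [h]

theorem pvGroup_append (p : List (String × String × String)) (sel) (k : String)
    (t : String × String × String) :
    pvGroup (p ++ [t]) sel k = pvGroup p sel k ++ (if t.1 = k then [sel t] else []) := by
  simp only [pvGroup, List.filter_append, List.map_append, List.filter_cons, List.filter_nil]
  by_cases h : t.1 = k <;> simp [h]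

theorem pvGroup_of_not_mem (p : List (String × String × String)) (sel) (k : String)
    (h : k ∉ p.map (·.1)) : pvGroup p sel k = [] := by
  simp only [pvGroup, List.map_eq_nil_iff, List.filter_eq_nil_iff]
  intro t ht hc
  exact h (List.mem_map.mpr ⟨t, ht, by simpa using hc⟩)

theorem pvGroupD_keys (p : List (String × String × String)) (sel) :
    (pvGroupD p sel).keys = pvIds p := by
  simp [PySem.Dict.keys, pvGroupD, List.map_map, Function.comp_def]

theorem pvSttD_keys (p : List (String × String × String)) :
    (pvSttD p).keys = pvIds p := by
  simp [PySem.Dict.keys, pvSttD, List.map_map, Function.comp_def,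
    PySem.List.map_snd_enumerate]

theorem pvGroupD_contains (p : List (String × String × String)) (sel) (m : String) :
    (pvGroupD p sel).contains m = decide (m ∈ pvIds p) := by
  rw [PySem.Dict.contains_eq_decide_mem_keys, pvGroupD_keys]

theorem pvSttD_contains (p : List (String × String × String)) (m : String) :
    (pvSttD p).contains m = decide (m ∈ pvIds p) := by
  rw [PySem.Dict.contains_eq_decide_mem_keys, pvSttD_keys]

-- existing id: the grouped dict is A's modify-append
theorem pvGroupD_step_mem (p : List (String × String × String)) (sel)
    (t : String × String × String) (h : t.1 ∈ pvIds p) :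
    pvGroupD (p ++ [t]) sel = (pvGroupD p sel).modify t.1 [] (· ++ [sel t]) := by
  have hget : (pvGroupD p sel).getD t.1 [] = pvGroup p sel t.1 := by
    apply PySem.Dict.getD_of_mem_items
    · exact List.mem_map.mpr ⟨t.1, h, rfl⟩
    · rw [pvGroupD_keys]; exact pvNodup_ids p
  rw [pvModify_eq, hget]
  apply PySem.Dict.ext
  rw [PySem.Dict.items_insert_of_contains _ _ (by rw [pvGroupD_contains]; simpa using h)]
  show (pvIds (p ++ [t])).map _ = ((pvIds p).map _).map _
  rw [pvIds_append, if_pos h, List.map_map]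
  apply List.map_congr_left
  intro k _
  by_cases hk : k = t.1
  · subst hk; simp [pvGroup_append]
  · have hb : (k == t.1) = false := by simpa using hk
    have hne : ¬ t.1 = k := fun hh => hk hh.symm
    simp [pvGroup_append, hne]
    exact fun hkk => absurd hkk hk

-- fresh id: the grouped dict is A's insert of a singleton
theorem pvGroupD_step_fresh (p : List (String × String × String)) (sel)
    (t : String × String × String) (h : t.1 ∉ pvIds p) :
    pvGroupD (p ++ [t]) sel = (pvGroupD p sel).insert t.1 [sel t] := by
  apply PySem.Dict.ext
  rw [PySem.Dict.items_insert_of_not_contains _ _ (by rw [pvGroupD_contains]; simpa using h)]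
  show (pvIds (p ++ [t])).map _ = (pvIds p).map _ ++ [(t.1, [sel t])]
  rw [pvIds_append, if_neg h, List.map_append]
  congr 1
  · apply List.map_congr_left
    intro k hk
    have : ¬ t.1 = k := fun hh => h (hh ▸ hk)
    simp [pvGroup_append, this]
  · have h0 : pvGroup p sel t.1 = [] :=
      pvGroup_of_not_mem p sel t.1 (fun hh => h ((pvMem_ids p t.1).mpr hh))
    simp [pvGroup_append, h0]

theorem pvSttD_step_mem (p : List (String × String × String)) (t : String × String × String)
    (h : t.1 ∈ pvIds p) : pvSttD (p ++ [t]) = pvSttD p := by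
  unfold pvSttD
  rw [pvIds_append, if_pos h]

theorem pvSttD_step_fresh (p : List (String × String × String)) (t : String × String × String)
    (h : t.1 ∉ pvIds p) :
    pvSttD (p ++ [t]) = (pvSttD p).insert t.1 ((pvIds p).length : Int) := by
  apply PySem.Dict.ext
  rw [PySem.Dict.items_insert_of_not_contains _ _ (by rw [pvSttD_contains]; simpa using h)]
  show (PySem.List.enumerate (pvIds (p ++ [t])) 0).map _ = _ ++ [(t.1, ((pvIds p).length : Int))]
  rw [pvIds_append, if_neg h, PySem.List.enumerate_append]
  simp [PySem.List.enumerate, pvSttD]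

theorem pvIds_length_append_mem (p : List (String × String × String))
    (t : String × String × String) (h : t.1 ∈ pvIds p) :
    pvIds (p ++ [t]) = pvIds p := by rw [pvIds_append, if_pos h]

theorem pvAClosed_step (p : List (String × String × String)) (t : String × String × String) :
    pvAClosed (p ++ [t]) = pvAStep' (pvAClosed p) t := by
  obtain ⟨m, sn, hn⟩ := t
  simp only [pvAClosed, pvAStep']
  have hs2 : ((p ++ [(m, sn, hn)]).flatMap (fun t => [(t.2.1, t.1), (t.2.2, t.1)])).foldl
        (fun d q => d.insert q.1 q.2) PySem.Dict.empty =
      (((p.flatMap (fun t => [(t.2.1, t.1), (t.2.2, t.1)])).foldl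
        (fun d q => d.insert q.1 q.2) PySem.Dict.empty).insert sn m).insert hn m := by
    rw [List.flatMap_append, List.foldl_append]; rfl
  by_cases h : m ∈ pvIds p
  · rw [if_neg (by rw [pvGroupD_contains]; simpa using h),
        if_neg (by rw [pvSttD_contains]; simpa using h), hs2,
        pvGroupD_step_mem p _ (m, sn, hn) h, pvGroupD_step_mem p _ (m, sn, hn) h,
        pvSttD_step_mem p (m, sn, hn) h, pvIds_length_append_mem p (m, sn, hn) h]
  · rw [if_pos (by rw [pvGroupD_contains]; simpa using h),
        if_pos (by rw [pvSttD_contains]; simpa using h), hs2,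
        pvGroupD_step_fresh p _ (m, sn, hn) h, pvGroupD_step_fresh p _ (m, sn, hn) h,
        pvSttD_step_fresh p (m, sn, hn) h, pvIds_append]
    rw [if_neg h]
    simp

theorem pvAClosed_eq (p : List (String × String × String)) :
    p.foldl pvAStep' (PySem.Dict.empty, PySem.Dict.empty, PySem.Dict.empty, PySem.Dict.empty, 0) =
      pvAClosed p := by
  induction p using List.reverseRecOn with
  | nil => rfl
  | append_singleton p t ih =>
      rw [List.foldl_append, ih, List.foldl_cons, List.foldl_nil, ← pvAClosed_step]

-- ===== VERDICT (by name: the statement is the Claim_ definition above) =====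
theorem create_meta_dict_spec : Claim_equal_create_meta_dict := by
  intro tm _ _
  unfold Spec_create_meta_dict
  simp only [create_meta_dict, create_meta_dict_alt]
  have hfold : tm.foldl pvAStep
      (PySem.Dict.empty, PySem.Dict.empty, PySem.Dict.empty, PySem.Dict.empty, 0) =
      pvAClosed (tm.map pvTriple) := by
    rw [← pvAClosed_eq, List.foldl_map]
    exact PySem.List.foldl_congr_mem tm _ _ _ (fun acc x _ => pvAStep_eq acc x)
  rw [hfold]
  have hnd : (pvIds (tm.map pvTriple)).Nodup := pvNodup_ids _
  have h1 := PySem.Dict.items_foldl_insert_fresh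
      (PySem.List.dedup ((tm.map pvTriple).map (fun x => x.1))) (fun m => m)
      (fun m => ((tm.map pvTriple).filter (fun t => t.1 == m)).map (fun x => x.2.2))
      PySem.Dict.empty (fun a _ => PySem.Dict.contains_empty _) (by simp)
  have h2 := PySem.Dict.items_foldl_insert_fresh
      (PySem.List.dedup ((tm.map pvTriple).map (fun x => x.1))) (fun m => m)
      (fun m => ((tm.map pvTriple).filter (fun t => t.1 == m)).map (fun x => x.2.1))
      PySem.Dict.empty (fun a _ => PySem.Dict.contains_empty _) (by simp)
  have h3 := PySem.Dict.items_foldl_insert_fresh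
      (PySem.List.enumerate (PySem.List.dedup ((tm.map pvTriple).map (fun x => x.1))) 0)
      (fun q => q.2) (fun q => q.1)
      PySem.Dict.empty (fun a _ => PySem.Dict.contains_empty _)
      (by rw [PySem.List.map_snd_enumerate]; exact hnd)
  rw [h1, h2, h3]
  simp [pvAClosed, pvGroupD, pvSttD, pvGroup, pvIds, PySem.Dict.empty]
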